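-- pv_equiv track=rewrite | github.com/JIN-smile/Improved-Related-key-Differential-based-Neural-Distinguishers | simeck32_diff_basicTraining/simeck32_diff.py | expand_key_simeck
-- ===== SOURCE A (Python) =====
-- def WORD_SIZE():
--     return(16)
--
-- MASK_VAL = 2 ** WORD_SIZE() - 1
--
-- const_simeck = [0xfffd, 0xfffd, 0xfffd, 0xfffd,
--                 0xfffd, 0xfffc, 0xfffc, 0xfffc,
--                 0xfffd, 0xfffd, 0xfffc, 0xfffd,
--                 0xfffd, 0xfffd, 0xfffc, 0xfffd,
--                 0xfffc, 0xfffd, 0xfffc, 0xfffc,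
--                 0xfffc, 0xfffc, 0xfffd, 0xfffc,
--                 0xfffc, 0xfffd, 0xfffc, 0xfffd,
--                 0xfffd, 0xfffc, 0xfffc, 0xfffd]
--
-- def rol(x,k):
--     return(((x << k) & MASK_VAL) | (x >> (WORD_SIZE() - k)))
--
-- def expand_key_simeck(k, t):
--     ks = [0 for i in range(t)]
--     ks_tmp = [0,0,0,0]
--     ks_tmp[0] = k[3]
--     ks_tmp[1] = k[2]
--     ks_tmp[2] = k[1]
--     ks_tmp[3] = k[0]
--     ks[0] = ks_tmp[0]
--     for i in range(1, t):
--         ks[i] = ks_tmp[1]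
--         tmp = (rol(ks_tmp[1], 5) & rol(ks_tmp[1], 0)) ^ rol(ks_tmp[1], 1) ^ ks[i-1] ^ const_simeck[i-1]
--         ks_tmp[1] = ks_tmp[2]
--         ks_tmp[2] = ks_tmp[3]
--         ks_tmp[3] = tmp
--     return(ks)
-- ===== SOURCE B (Python) =====
-- def WORD_SIZE():
--     return(16)
--
-- MASK_VAL = 2 ** WORD_SIZE() - 1
--
-- const_simeck = [0xfffd, 0xfffd, 0xfffd, 0xfffd,
--                 0xfffd, 0xfffc, 0xfffc, 0xfffc,
--                 0xfffd, 0xfffd, 0xfffc, 0xfffd,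
--                 0xfffd, 0xfffd, 0xfffc, 0xfffd,
--                 0xfffc, 0xfffd, 0xfffc, 0xfffc,
--                 0xfffc, 0xfffc, 0xfffd, 0xfffc,
--                 0xfffc, 0xfffd, 0xfffc, 0xfffd,
--                 0xfffd, 0xfffc, 0xfffc, 0xfffd]
--
-- def rol(x, k):
--     return(((x << k) & MASK_VAL) | (x >> (WORD_SIZE() - k)))
--
-- def _round_fn(x):
--     # Simeck key-schedule round function F(x) = (x<<<5 & x<<<0) ^ x<<<1
--     return (rol(x, 5) & rol(x, 0)) ^ rol(x, 1)
--
-- def expand_key_simeck(k, t):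
--     # direct recurrence on the output list; no shift-register window
--     init = (k[3], k[2], k[1], k[0])
--     ks = []
--     for i in range(t):
--         if i < 4:
--             ks.append(init[i])
--         else:
--             ks.append(_round_fn(ks[i - 3]) ^ ks[i - 4] ^ const_simeck[i - 4])
--     return ks
-- ===== Notes on version B (the rewrite author's own statement) =====
-- stated objective: simpler
-- what changed: Replaced the 4-word sliding shift-register ks_tmp and the preallocated zero array by a direct recurrence that appends to the output list and indexes back into it: ks[i] = F(ks[i-3]) ^ ks[i-4] ^ const_simeck[i-4] for i >= 4, with ks[0..3] taken from k reversed.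
-- crash fix: For len(k) >= 4 and t <= 0 (A writes ks[0] into an empty list) or 34 <= t <= 36 (A reads const_simeck past its end on the final, unused tmp), A raises IndexError while B returns the natural length-t prefix of the schedule ([] for t <= 0). — e.g. on expand_key_simeck([1, 2, 3, 4], 0): A raises IndexError, B returns []
import Mathlib
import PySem

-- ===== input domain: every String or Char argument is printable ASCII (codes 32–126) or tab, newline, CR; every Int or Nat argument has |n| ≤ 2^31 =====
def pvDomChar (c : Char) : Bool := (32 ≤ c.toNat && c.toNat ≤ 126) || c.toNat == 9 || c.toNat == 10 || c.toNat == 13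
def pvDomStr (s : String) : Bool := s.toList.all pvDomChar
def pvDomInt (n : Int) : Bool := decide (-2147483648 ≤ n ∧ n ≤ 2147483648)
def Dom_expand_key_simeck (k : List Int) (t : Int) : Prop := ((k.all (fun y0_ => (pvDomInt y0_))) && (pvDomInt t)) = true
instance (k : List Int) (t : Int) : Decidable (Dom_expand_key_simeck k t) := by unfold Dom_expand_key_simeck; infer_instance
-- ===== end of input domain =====

-- B replaces A's 4-word shift-register ks_tmp by the direct recurrence ks[i] = F(ks[i-3]) ^ ks[i-4] ^ const_simeck[i-4], appending to the output list (simpler decomposition, same cost).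

-- ===== PORT A =====
-- rol(x, k) for the fixed rotation amounts 0, 1, 5 (exact: Python << >> & | on arbitrary ints)
def rolA (x : Int) (s : Nat) : Int :=
  PySem.Int.bor (PySem.Int.band (x <<< s) 65535) (x >>> (16 - s))

def constSimeck : List Int :=
  [0xfffd, 0xfffd, 0xfffd, 0xfffd,
   0xfffd, 0xfffc, 0xfffc, 0xfffc,
   0xfffd, 0xfffd, 0xfffc, 0xfffd,
   0xfffd, 0xfffd, 0xfffc, 0xfffd,
   0xfffc, 0xfffd, 0xfffc, 0xfffc,
   0xfffc, 0xfffc, 0xfffd, 0xfffc,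
   0xfffc, 0xfffd, 0xfffc, 0xfffd,
   0xfffd, 0xfffc, 0xfffc, 0xfffd]

-- loop body of A: state = (ks, ks_tmp[1], ks_tmp[2], ks_tmp[3]); ks_tmp[0] is never touched after init
-- (list indexing uses pyGetD with default 0: the out-of-range case = Python's IndexError is excluded by Pre_)
def stepA (st : List Int × Int × Int × Int) (i : Int) : List Int × Int × Int × Int :=
  match st with
  | (ks, w1, w2, w3) =>
    let ks' := ks.set i.toNat w1                     -- ks[i] = ks_tmp[1]
    let tmp := PySem.Int.bxor (PySem.Int.bxor (PySem.Int.bxor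
        (PySem.Int.band (rolA w1 5) (rolA w1 0)) (rolA w1 1))
        (PySem.List.pyGetD ks' (i-1) 0)) (PySem.List.pyGetD constSimeck (i-1) 0)
    (ks', w2, w3, tmp)

def expand_key_simeck (k : List Int) (t : Int) : List Int :=
  let ks0 := List.replicate t.toNat (0 : Int)        -- ks = [0 for i in range(t)]
  let kt0 := PySem.List.pyGetD k 3 0                 -- ks_tmp[0] = k[3]  (IndexError if len(k) < 4: excluded by Pre_)
  let kt1 := PySem.List.pyGetD k 2 0
  let kt2 := PySem.List.pyGetD k 1 0
  let kt3 := PySem.List.pyGetD k 0 0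
  let ks1 := ks0.set 0 kt0                           -- ks[0] = ks_tmp[0]  (IndexError if t ≤ 0: excluded by Pre_)
  ((PySem.List.pyRange 1 t 1).foldl stepA (ks1, kt1, kt2, kt3)).1

-- ===== PORT B =====
-- Simeck key-schedule round function F(x) = (x<<<5 & x<<<0) ^ x<<<1
def roundFn (x : Int) : Int :=
  PySem.Int.bxor (PySem.Int.band (rolA x 5) (rolA x 0)) (rolA x 1)

-- loop body of B: append directly to the growing schedule, indexing back into it
def stepB (init : List Int) (ks : List Int) (i : Int) : List Int :=
  ks ++ [if i < 4 then PySem.List.pyGetD init i 0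
         else PySem.Int.bxor (PySem.Int.bxor (roundFn (PySem.List.pyGetD ks (i-3) 0))
                (PySem.List.pyGetD ks (i-4) 0)) (PySem.List.pyGetD constSimeck (i-4) 0)]

def expand_key_simeck_alt (k : List Int) (t : Int) : List Int :=
  let init : List Int := [PySem.List.pyGetD k 3 0, PySem.List.pyGetD k 2 0,
                          PySem.List.pyGetD k 1 0, PySem.List.pyGetD k 0 0]
  (PySem.List.pyRange 0 t 1).foldl (stepB init) []

-- ===== PRECONDITION & SPEC =====
-- Pre_ is exactly where the Python A returns normally: k[3] needs at least 4 key words,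
-- ks[0] = … needs t ≥ 1, and the last loop iteration reads const_simeck[t-2], so t ≤ 33.
def Pre_expand_key_simeck (k : List Int) (t : Int) : Prop :=
  4 ≤ k.length ∧ 1 ≤ t ∧ t ≤ 33
instance (k : List Int) (t : Int) : Decidable (Pre_expand_key_simeck k t) := by
  unfold Pre_expand_key_simeck; infer_instance

def pvWitness_expand_key_simeck : List Int × Int := ([11, 22, 33, 44], 6)

-- For t ≤ 0 (ks[0] into an empty list) and 34 ≤ t ≤ 36 (const_simeck read past its end) with
-- len(k) ≥ 4, A raises IndexError while B returns the natural length-t prefix of the schedule.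
def Raises_expand_key_simeck (k : List Int) (t : Int) : Prop :=
  4 ≤ k.length ∧ (t ≤ 0 ∨ (34 ≤ t ∧ t ≤ 36))
instance (k : List Int) (t : Int) : Decidable (Raises_expand_key_simeck k t) := by
  unfold Raises_expand_key_simeck; infer_instance
def pvRaiseWitness_expand_key_simeck : List Int × Int := ([1, 2, 3, 4], 0)
def pvRaiseWitnessOut_expand_key_simeck : List Int := []

def Spec_expand_key_simeck (k : List Int) (t : Int) (out : List Int) : Prop := out = expand_key_simeck_alt k t
instance (k : List Int) (t : Int) (out : List Int) : Decidable (Spec_expand_key_simeck k t out) := by unfold Spec_expand_key_simeck; infer_instance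

-- ===== CLAIM (what is proved, stated in full; the proofs are below) =====
def Claim_equal_expand_key_simeck : Prop := ∀ (k : List Int) (t : Int), Dom_expand_key_simeck k t → Pre_expand_key_simeck k t → Spec_expand_key_simeck k t (expand_key_simeck k t)

def Claim_raises_expand_key_simeck : Prop :=
  (∀ (k : List Int) (t : Int), Dom_expand_key_simeck k t → Raises_expand_key_simeck k t → ¬ Pre_expand_key_simeck k t) ∧
  (Dom_expand_key_simeck (pvRaiseWitness_expand_key_simeck.1) (pvRaiseWitness_expand_key_simeck.2) ∧
   Raises_expand_key_simeck (pvRaiseWitness_expand_key_simeck.1) (pvRaiseWitness_expand_key_simeck.2) ∧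
   expand_key_simeck_alt (pvRaiseWitness_expand_key_simeck.1) (pvRaiseWitness_expand_key_simeck.2) = pvRaiseWitnessOut_expand_key_simeck)

-- ===== LEMMAS AND PROOFS =====

-- the key-schedule sequence both programs compute: refSeq a b c d n = ks[n] for key words a=k[3], b=k[2], c=k[1], d=k[0]
def refSeq (a b c d : Int) : ℕ → Int
  | 0 => a
  | 1 => b
  | 2 => c
  | 3 => d
  | (m+4) => PySem.Int.bxor (PySem.Int.bxor (roundFn (refSeq a b c d (m+1))) (refSeq a b c d m))
               (PySem.List.pyGetD constSimeck ((m : Nat) : Int) 0)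

def kv (k : List Int) : ℕ → Int :=
  refSeq (PySem.List.pyGetD k 3 0) (PySem.List.pyGetD k 2 0)
         (PySem.List.pyGetD k 1 0) (PySem.List.pyGetD k 0 0)

lemma getD_prefix (f : ℕ → Int) (n : ℕ) (ys : List Int) (j : ℕ) (hj : j < n) :
    PySem.List.pyGetD ((List.range n).map f ++ ys) ((j : Nat) : Int) 0 = f j := by
  rw [PySem.List.pyGetD_natCast]
  rw [List.getD_eq_getElem?_getD, List.getElem?_append_left (by simpa using hj)]
  simp [hj]

lemma getD_range_map (f : ℕ → Int) (n : ℕ) (j : ℕ) (hj : j < n) :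
    PySem.List.pyGetD ((List.range n).map f) ((j : Nat) : Int) 0 = f j := by
  simpa using getD_prefix f n [] j hj

lemma kv_add_four (k : List Int) (m : ℕ) :
    kv k (m + 4) = PySem.Int.bxor (PySem.Int.bxor (roundFn (kv k (m + 1))) (kv k m))
      (PySem.List.pyGetD constSimeck ((m : Nat) : Int) 0) := by
  show refSeq _ _ _ _ (m + 4) = _
  rw [refSeq]
  simp only [kv]

lemma loopB (k : List Int) (m : ℕ) :
    (PySem.List.pyRange 0 (m : Int) 1).foldl
      (stepB [PySem.List.pyGetD k 3 0, PySem.List.pyGetD k 2 0,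
              PySem.List.pyGetD k 1 0, PySem.List.pyGetD k 0 0]) []
    = (List.range m).map (kv k) := by
  induction m with
  | zero => simp [PySem.List.pyRange_one_eq_nil]
  | succ m ih =>
    rw [show ((m + 1 : ℕ) : Int) = (m : Int) + 1 by push_cast; ring,
        PySem.List.pyRange_one_succ_right (by positivity), List.foldl_append, ih]
    simp only [List.foldl_cons, List.foldl_nil, stepB, List.range_succ, List.map_append,
      List.map_cons, List.map_nil]
    congr 1
    by_cases h4 : (m : Int) < 4
    · have hm4 : m < 4 := by exact_mod_cast h4
      rw [if_pos h4]
      interval_cases m <;> simp [kv, refSeq, PySem.List.pyGetD, PySem.List.pyGet?, PySem.List.pyIdx?]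
    · rw [if_neg h4]
      have hm4 : 4 ≤ m := by omega
      obtain ⟨m', rfl⟩ : ∃ m', m = m' + 4 := ⟨m - 4, by omega⟩
      have h3 : ((m' + 4 : ℕ) : Int) - 3 = ((m' + 1 : ℕ) : Int) := by push_cast; ring
      have h4' : ((m' + 4 : ℕ) : Int) - 4 = ((m' : ℕ) : Int) := by push_cast; ring
      rw [h3, h4', getD_range_map (kv k) _ _ (by omega), getD_range_map (kv k) _ _ (by omega),
          ← kv_add_four]

lemma B_closed (k : List Int) (t : Int) (ht : 0 ≤ t) :
    expand_key_simeck_alt k t = (List.range t.toNat).map (kv k) := by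
  have h : ((t.toNat : ℕ) : Int) = t := Int.toNat_of_nonneg ht
  have hl := loopB k t.toNat
  rw [h] at hl
  exact hl

lemma loopA (k : List Int) (N : ℕ) (hN : 1 ≤ N) :
    ∀ m : ℕ, 1 ≤ m → m ≤ N →
    (PySem.List.pyRange 1 (m : Int) 1).foldl stepA
      ((List.replicate N (0 : Int)).set 0 (kv k 0), kv k 1, kv k 2, kv k 3)
    = ((List.range m).map (kv k) ++ List.replicate (N - m) 0, kv k m, kv k (m+1), kv k (m+2)) := by
  intro m hm
  induction m with
  | zero => omega
  | succ m ih =>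
    intro hmN
    rcases Nat.eq_or_lt_of_le hm with h1 | h1
    · -- base: m + 1 = 1
      obtain rfl : m = 0 := by omega
      obtain ⟨N', rfl⟩ : ∃ N', N = N' + 1 := ⟨N - 1, by omega⟩
      simp [PySem.List.pyRange_one_eq_nil, List.replicate_succ, kv, refSeq]
    · have hm1 : 1 ≤ m := by omega
      rw [show ((m + 1 : ℕ) : Int) = (m : Int) + 1 by push_cast; ring,
          PySem.List.pyRange_one_succ_right (by exact_mod_cast hm1), List.foldl_append,
          ih hm1 (by omega)]
      simp only [List.foldl_cons, List.foldl_nil, stepA]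
      have hset : ((List.range m).map (kv k) ++ List.replicate (N - m) (0:Int)).set (m : Int).toNat (kv k m)
          = (List.range (m+1)).map (kv k) ++ List.replicate (N - (m+1)) 0 := by
        obtain ⟨c, hc⟩ : ∃ c, N - m = c + 1 := ⟨N - m - 1, by omega⟩
        rw [Int.toNat_natCast, hc, List.replicate_succ,
            List.set_append_right _ _ (by simp),
            List.range_succ, List.map_append]
        simp [show N - (m+1) = c by omega]
      rw [hset]
      obtain ⟨m', rfl⟩ : ∃ m', m = m' + 1 := ⟨m - 1, by omega⟩
      have h1' : ((m' + 1 : ℕ) : Int) - 1 = ((m' : ℕ) : Int) := by push_cast; ring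
      rw [h1', getD_prefix (kv k) _ _ _ (by omega)]
      have hkv : kv k (m' + 1 + 3) = PySem.Int.bxor (PySem.Int.bxor (PySem.Int.bxor
          (PySem.Int.band (rolA (kv k (m' + 1)) 5) (rolA (kv k (m' + 1)) 0)) (rolA (kv k (m' + 1)) 1))
          (kv k m')) (PySem.List.pyGetD constSimeck ((m' : ℕ) : Int) 0) := by
        show refSeq _ _ _ _ (m' + 4) = _
        rw [refSeq, roundFn]
        simp only [kv]
      rw [← hkv]

lemma A_closed (k : List Int) (t : Int) (h1 : 1 ≤ t) :
    expand_key_simeck k t = (List.range t.toNat).map (kv k) := by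
  have hN : 1 ≤ t.toNat := by omega
  have h : ((t.toNat : ℕ) : Int) = t := Int.toNat_of_nonneg (by omega)
  have := loopA k t.toNat hN t.toNat hN le_rfl
  rw [h] at this
  show ((PySem.List.pyRange 1 t 1).foldl stepA
      ((List.replicate t.toNat (0:Int)).set 0 (PySem.List.pyGetD k 3 0),
        PySem.List.pyGetD k 2 0, PySem.List.pyGetD k 1 0, PySem.List.pyGetD k 0 0)).1
      = (List.range t.toNat).map (kv k)
  have hkv0 : PySem.List.pyGetD k 3 0 = kv k 0 := rfl
  have hkv1 : PySem.List.pyGetD k 2 0 = kv k 1 := rfl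
  have hkv2 : PySem.List.pyGetD k 1 0 = kv k 2 := rfl
  have hkv3 : PySem.List.pyGetD k 0 0 = kv k 3 := rfl
  rw [hkv0, hkv1, hkv2, hkv3, this]
  simp

-- ===== VERDICT (by name: the statement is the Claim_ definition above) =====
theorem expand_key_simeck_spec : Claim_equal_expand_key_simeck := by
  intro k t _ hpre
  obtain ⟨hk, h1, h33⟩ := hpre
  show expand_key_simeck k t = expand_key_simeck_alt k t
  rw [A_closed k t h1, B_closed k t (by omega)]

@[simp]
theorem expand_key_simeck_raises : Claim_raises_expand_key_simeck := by
  unfold Claim_raises_expand_key_simeck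
  refine ⟨fun k t _ hr hp => ?_, by decide⟩
  rcases hr with ⟨_, h | h⟩ <;> rcases hp with ⟨_, h1, h33⟩ <;> omega
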